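-- pv_equiv track=rewrite | github.com/Nalla-V/SNACS | preprocess.py | looks_like_header
-- ===== SOURCE A (Python) =====
-- def looks_like_header(tokens):
--     """Return True if the token pair looks like a header row."""
--     if len(tokens) < 2:
--         return False
--
--     common_headers = {
--         "source", "target", "u", "v", "node1", "node2",
--         "from", "to", "src", "dst", "id1", "id2", "head", "tail"
--     }
--
--     # If either token is a known header keyword → definitely header
--     if any(t.lower() in common_headers for t in tokens):
--         return True
--
--     # If both tokens are purely numeric (or negative integers) → data, not header
--     both_numeric = all(
--         t.strip().replace("-", "").isdigit() and t.strip() != ""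
--         for t in tokens
--     )
--     if both_numeric:
--         return False
--
--     # If any token contains letters → likely header (node IDs are usually numeric or UUIDs)
--     if any(any(c.isalpha() for c in t) for t in tokens):
--         return True
--
--     return False
-- ===== SOURCE B (Python) =====
-- def looks_like_header(tokens):
--     """Return True if the token pair looks like a header row."""
--     if len(tokens) < 2:
--         return False
--     # Every known header keyword is purely alphabetic, and a token that passes
--     # A's all-digits test cannot contain a letter; so both of A's keyword and
--     # numeric scans collapse into one question: does any token contain a letter?
--     return any(c.isalpha() for t in tokens for c in t)
-- ===== Notes on version B (the rewrite author's own statement) =====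
-- stated objective: simpler
-- what changed: B collapses A's three staged scans (keyword-set lookup with lower(), strip/replace/isdigit all-numeric test, per-token letter test) into a single flattened character-level scan: header iff len>=2 and any character of any token is a letter; this is exact because every keyword in the set is purely alphabetic and an all-digits token contains no letter.
import Mathlib
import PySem

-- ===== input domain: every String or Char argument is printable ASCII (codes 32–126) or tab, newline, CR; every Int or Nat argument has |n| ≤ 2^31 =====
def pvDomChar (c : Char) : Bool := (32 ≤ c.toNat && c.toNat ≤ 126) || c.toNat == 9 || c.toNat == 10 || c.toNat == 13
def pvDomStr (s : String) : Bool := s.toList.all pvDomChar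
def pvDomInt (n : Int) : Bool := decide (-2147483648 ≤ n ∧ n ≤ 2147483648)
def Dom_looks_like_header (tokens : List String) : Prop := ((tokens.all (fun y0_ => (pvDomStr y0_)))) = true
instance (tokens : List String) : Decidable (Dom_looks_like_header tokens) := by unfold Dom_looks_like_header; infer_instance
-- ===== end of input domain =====

-- B replaces A's three staged scans (keyword set, all-digits test, letter test) with one
-- character-level question: len>=2 and some character of some token is a letter; this is
-- equivalent because every keyword is purely alphabetic and an all-digits token has no letter.


-- ===== PORT A =====
def commonHeadersA : PySem.Set String :=
  PySem.Set.ofList ["source", "target", "u", "v", "node1", "node2",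
                    "from", "to", "src", "dst", "id1", "id2", "head", "tail"]

def looks_like_header (tokens : List String) : Bool :=
  if tokens.length < 2 then false
  else if tokens.any (fun t => PySem.Set.contains commonHeadersA (PySem.Str.lower t)) then true
  else
    let both_numeric := tokens.all (fun t =>
      PySem.Str.strIsdigit (PySem.Str.replace (PySem.Str.strip t) "-" "")
        && !(PySem.Str.strip t == ""))
    if both_numeric then false
    else if tokens.any (fun t => t.toList.any PySem.Chars.isalpha) then true
    else false

-- ===== PORT B =====
def looks_like_header_alt (tokens : List String) : Bool :=
  if tokens.length < 2 then false
  else (tokens.flatMap String.toList).any PySem.Chars.isalpha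

-- ===== PRECONDITION & SPEC =====
def Spec_looks_like_header (tokens : List String) (out : Bool) : Prop := out = looks_like_header_alt tokens
instance (tokens : List String) (out : Bool) : Decidable (Spec_looks_like_header tokens out) := by unfold Spec_looks_like_header; infer_instance

-- ===== CLAIM (what is proved, stated in full; the proofs are below) =====
def Claim_equal_looks_like_header : Prop := ∀ (tokens : List String), Dom_looks_like_header tokens → Spec_looks_like_header tokens (looks_like_header tokens)

-- ===== LEMMAS AND PROOFS =====

-- An alphabetic character is not whitespace, not '-', and not a digit.
theorem isalpha_props (c : Char) (h : PySem.Chars.isalpha c = true) :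
    PySem.Chars.isspace c = false ∧ c ≠ '-' ∧ PySem.Chars.isdigit c = false := by
  simp only [PySem.Chars.isalpha, PySem.Chars.isupper, PySem.Chars.islower, Bool.or_eq_true,
    Bool.and_eq_true, decide_eq_true_eq, Char.le_def, UInt32.le_iff_toNat_le] at h
  have hn : (65 ≤ c.toNat ∧ c.toNat ≤ 90) ∨ (97 ≤ c.toNat ∧ c.toNat ≤ 122) := h
  have hcv : c.val.toNat = c.toNat := rfl
  refine ⟨?_, ?_, ?_⟩
  · simp only [PySem.Chars.isspace, Bool.or_eq_false_iff, Bool.and_eq_false_iff,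
      decide_eq_false_iff_not, not_le]
    omega
  · rintro rfl
    have : ('-').toNat = 45 := rfl
    omega
  · simp only [PySem.Chars.isdigit, Bool.and_eq_false_iff, decide_eq_false_iff_not, not_le,
      Char.le_def, UInt32.le_iff_toNat_le]
    have h0 : ('0').val.toNat = 48 := rfl
    have h9 : ('9').val.toNat = 57 := rfl
    omega

-- A non-whitespace member of cs survives strip.
theorem mem_strip_of_not_isspace {cs : List Char} {c : Char}
    (hm : c ∈ cs) (hs : PySem.Chars.isspace c = false) : c ∈ PySem.Chars.strip cs := by
  have step : ∀ l : List Char, c ∈ l → c ∈ List.dropWhile PySem.Chars.isspace l := by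
    intro l hl
    have hsplit : List.takeWhile PySem.Chars.isspace l ++ List.dropWhile PySem.Chars.isspace l = l :=
      List.takeWhile_append_dropWhile
    rw [← hsplit] at hl
    rcases List.mem_append.mp hl with h | h
    · have := List.mem_takeWhile_imp h
      rw [hs] at this
      exact absurd this (by simp)
    · exact h
  have hl : c ∈ PySem.Chars.lstrip cs := step cs hm
  simp only [PySem.Chars.strip, PySem.Chars.rstrip, List.mem_reverse]
  exact step _ (List.mem_reverse.mpr hl)

-- replace with a single-character old and empty new is a filter.
theorem replace_go_dash (fuel : Nat) (l acc : List Char) (hf : l.length ≤ fuel) :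
    PySem.Chars.replace.go ['-'] [] fuel l acc
      = acc.reverse ++ l.filter (fun c => !(c == '-')) := by
  induction fuel generalizing l acc with
  | zero =>
    have : l = [] := List.eq_nil_of_length_eq_zero (Nat.le_zero.mp hf)
    subst this
    simp [PySem.Chars.replace.go]
  | succ n ih =>
    cases l with
    | nil => simp [PySem.Chars.replace.go]
    | cons c t =>
      have hlen : t.length ≤ n := by simpa using hf
      by_cases hc : c = '-'
      · subst hc
        have hp : List.isPrefixOf ['-'] ('-' :: t) = true := by simp [List.isPrefixOf]
        simp only [PySem.Chars.replace.go, hp, if_true]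
        rw [show List.drop (['-'] : List Char).length ('-' :: t) = t from rfl]
        simp only [List.reverse_nil, List.nil_append]
        rw [ih t acc hlen]
        simp
      · have hp : List.isPrefixOf ['-'] (c :: t) = false := by
          simp only [List.isPrefixOf, Bool.and_eq_false_iff, beq_eq_false_iff_ne]
          exact Or.inl (fun h => hc h.symm)
        simp only [PySem.Chars.replace.go, hp, Bool.false_eq_true, if_false]
        rw [ih t (c :: acc) hlen]
        simp [hc]

theorem replace_dash (cs : List Char) :
    PySem.Chars.replace cs ['-'] [] = cs.filter (fun c => !(c == '-')) := by
  simp only [PySem.Chars.replace, List.isEmpty_cons, if_false, Bool.false_eq_true]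
  exact replace_go_dash cs.length cs [] (le_refl _)

-- If a token's stripped, '-'-free form is all digits, the token contains no letter.
theorem no_alpha_of_numeric (t : String)
    (h : PySem.Str.strIsdigit (PySem.Str.replace (PySem.Str.strip t) "-" "") = true) :
    t.toList.any PySem.Chars.isalpha = false := by
  rw [List.any_eq_false]
  intro c hc halpha
  obtain ⟨hspace, hdash, hdigit⟩ := isalpha_props c halpha
  have hmem : c ∈ PySem.Chars.strip t.toList := mem_strip_of_not_isspace hc hspace
  have hmem2 : c ∈ PySem.Chars.replace (PySem.Chars.strip t.toList) ['-'] [] := by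
    rw [replace_dash]
    simp only [List.mem_filter, Bool.not_eq_eq_eq_not, Bool.not_true, beq_eq_false_iff_ne]
    exact ⟨hmem, hdash⟩
  have hall : PySem.Chars.strIsdigit (PySem.Chars.replace (PySem.Chars.strip t.toList) ['-'] []) = true := by
    have := h
    simp only [PySem.Str.strIsdigit, PySem.Str.replace, PySem.Str.strip] at this
    simpa using this
  simp only [PySem.Chars.strIsdigit, Bool.and_eq_true, List.all_eq_true] at hall
  exact absurd (hall.2 c hmem2) (by simp [hdigit])

-- If the lowered form of a character is a letter, so is the character.
theorem alpha_of_lowerChar (c : Char) (h : PySem.Chars.isalpha (PySem.Chars.lowerChar c) = true) :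
    PySem.Chars.isalpha c = true := by
  unfold PySem.Chars.lowerChar at h
  by_cases hu : PySem.Chars.isupper c = true
  · simp [PySem.Chars.isalpha, hu]
  · rw [if_neg hu] at h
    exact h

-- If the lowered token contains a letter, so does the token.
theorem alpha_of_lower_alpha (cs : List Char)
    (h : (PySem.Chars.lower cs).any PySem.Chars.isalpha = true) :
    cs.any PySem.Chars.isalpha = true := by
  simp only [PySem.Chars.lower, List.any_map, List.any_eq_true, Function.comp] at h
  obtain ⟨c, hc, hl⟩ := h
  exact List.any_eq_true.mpr ⟨c, hc, alpha_of_lowerChar c hl⟩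

-- A token whose lowered form is a known header keyword contains a letter.
theorem alpha_of_keyword (t : String)
    (h : PySem.Set.contains commonHeadersA (PySem.Str.lower t) = true) :
    t.toList.any PySem.Chars.isalpha = true := by
  apply alpha_of_lower_alpha
  have hmem : PySem.Str.lower t ∈ ["source", "target", "u", "v", "node1", "node2",
      "from", "to", "src", "dst", "id1", "id2", "head", "tail"] := by
    have : PySem.Str.lower t ∈ commonHeadersA := by
      simpa [PySem.Set.contains] using h
    simpa [commonHeadersA, PySem.Set.ofList] using this
  simp only [List.mem_cons, List.not_mem_nil, or_false] at hmem
  rcases hmem with h' | h' | h' | h' | h' | h' | h' | h' | h' | h' | h' | h' | h' | h' <;>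
    · rw [← PySem.Str.toList_lower, h']; decide

-- ===== VERDICT (by name: the statement is the Claim_ definition above) =====
theorem looks_like_header_spec : Claim_equal_looks_like_header := by
  intro tokens _
  unfold Spec_looks_like_header looks_like_header looks_like_header_alt
  by_cases hlen : tokens.length < 2
  · simp [hlen]
  · simp only [hlen, if_false, List.any_flatMap]
    by_cases hkey : tokens.any (fun t => PySem.Set.contains commonHeadersA (PySem.Str.lower t)) = true
    · obtain ⟨t, ht, hkt⟩ := List.any_eq_true.mp hkey
      have : tokens.any (fun t => t.toList.any PySem.Chars.isalpha) = true :=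
        List.any_eq_true.mpr ⟨t, ht, alpha_of_keyword t hkt⟩
      simp only [hkey, if_true, this]
    · simp only [hkey, if_false, Bool.false_eq_true]
      by_cases hnum : tokens.all (fun t =>
          PySem.Str.strIsdigit (PySem.Str.replace (PySem.Str.strip t) "-" "")
            && !(PySem.Str.strip t == "")) = true
      · have halpha : tokens.any (fun t => t.toList.any PySem.Chars.isalpha) = false := by
          rw [List.any_eq_false]
          intro t ht
          rw [List.all_eq_true] at hnum
          have := hnum t ht
          simp only [Bool.and_eq_true] at this
          simp [no_alpha_of_numeric t this.1]
        simp only [hnum, halpha, if_true]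
      · have hnum' : (tokens.all (fun t =>
          PySem.Str.strIsdigit (PySem.Str.replace (PySem.Str.strip t) "-" "")
            && !(PySem.Str.strip t == ""))) = false := Bool.eq_false_iff.mpr hnum
        simp only [hnum', if_false, Bool.false_eq_true]
        cases h : tokens.any (fun t => t.toList.any PySem.Chars.isalpha)
        · simp
        · simp
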